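-- pv_equiv track=rewrite | github.com/sgrinich/CS328_Project | similarity.py | shepard_distance_function
-- ===== SOURCE A (Python) =====
-- def sym_difference(x,y):
-- 	return list(set(x) ^ set(y))
--
-- def get_index_for_binary_val(lst):
-- 	index_list = []
-- 	for i in range(len(lst)):
-- 		if lst[i] == 1:
-- 			index_list.append(i)
--
-- 	return index_list
--
-- def shepard_distance_function(a,b):
-- 	a = get_index_for_binary_val(a)
-- 	b = get_index_for_binary_val(b)
-- 	d = sym_difference(a,b)
-- 	count = 0
-- 	for i in range(len(d)):
-- 		count += 1
-- 	return (count * -1)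
-- ===== SOURCE B (Python) =====
-- def shepard_distance_function(a, b):
--     n = max(len(a), len(b))
--     count = 0
--     for i in range(n):
--         av = i < len(a) and a[i] == 1
--         bv = i < len(b) and b[i] == 1
--         if av != bv:
--             count += 1
--     return -count
-- ===== Notes on version B (the rewrite author's own statement) =====
-- stated objective: simpler
-- what changed: B drops the index-list and set symmetric-difference construction entirely and does one positional scan to max(len(a),len(b)), counting indices where exactly one of a,b holds 1, returning the negated counter.
import Mathlib
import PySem

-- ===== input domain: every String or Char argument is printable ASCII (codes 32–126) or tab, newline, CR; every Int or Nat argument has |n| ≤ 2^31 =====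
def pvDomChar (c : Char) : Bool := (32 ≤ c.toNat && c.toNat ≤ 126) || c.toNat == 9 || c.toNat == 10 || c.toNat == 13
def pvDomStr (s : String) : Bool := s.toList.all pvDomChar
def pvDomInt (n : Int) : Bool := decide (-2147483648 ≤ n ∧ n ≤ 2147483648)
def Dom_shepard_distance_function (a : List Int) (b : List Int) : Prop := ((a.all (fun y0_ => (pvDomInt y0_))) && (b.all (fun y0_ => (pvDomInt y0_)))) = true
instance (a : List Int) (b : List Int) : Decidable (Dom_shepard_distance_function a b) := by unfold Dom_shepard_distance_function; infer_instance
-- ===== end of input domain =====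

-- B replaces the index-list / set-symmetric-difference construction with one positional scan;
-- equivalence of the return value is proved on all inputs.

-- ===== PORT A =====
def sym_difference (x : List Int) (y : List Int) : List Int :=
  PySem.Set.symmDiff (PySem.Set.ofList x) (PySem.Set.ofList y)

def get_index_for_binary_val (lst : List Int) : List Int :=
  (PySem.List.pyRange 0 lst.length 1).foldl
    (fun acc i => if PySem.List.pyGetD lst i 0 == 1 then acc ++ [i] else acc) []

def shepard_distance_function (a : List Int) (b : List Int) : Int :=
  let a' := get_index_for_binary_val a
  let b' := get_index_for_binary_val b
  let d := sym_difference a' b'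
  let count : Int := (PySem.List.pyRange 0 d.length 1).foldl (fun c _ => c + 1) 0
  count * -1

-- ===== PORT B =====
def shepard_distance_function_alt (a : List Int) (b : List Int) : Int :=
  let n : Nat := max a.length b.length
  let count : Int := (PySem.List.pyRange 0 n 1).foldl
    (fun c i =>
      let av := decide (i < (a.length : Int)) && (PySem.List.pyGetD a i 0 == 1)
      let bv := decide (i < (b.length : Int)) && (PySem.List.pyGetD b i 0 == 1)
      if av != bv then c + 1 else c) 0;
  -count

-- ===== PRECONDITION & SPEC =====
def Spec_shepard_distance_function (a : List Int) (b : List Int) (out : Int) : Prop := out = shepard_distance_function_alt a b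
instance (a : List Int) (b : List Int) (out : Int) : Decidable (Spec_shepard_distance_function a b out) := by unfold Spec_shepard_distance_function; infer_instance

-- ===== CLAIM (what is proved, stated in full; the proofs are below) =====
def Claim_equal_shepard_distance_function : Prop := ∀ (a : List Int) (b : List Int), Dom_shepard_distance_function a b → Spec_shepard_distance_function a b (shepard_distance_function a b)

-- ===== LEMMAS AND PROOFS =====

-- the index list of A, characterised as a filtered range
lemma idx_eq (lst : List Int) :
    get_index_for_binary_val lst
      = ((List.range lst.length).filter (fun k => lst.getD k 0 == 1)).map (fun (k : Nat) => (k : Int)) := by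
  unfold get_index_for_binary_val
  rw [PySem.List.foldl_append_if_eq_filter, PySem.List.pyRange_zero_nat, List.filter_map]
  simp only [Function.comp_def, PySem.List.pyGetD_natCast, List.nil_append]

lemma nodup_idx (lst : List Int) : (get_index_for_binary_val lst).Nodup := by
  rw [idx_eq]
  exact (List.nodup_range.filter _).map (fun _ _ h => by exact_mod_cast h)

lemma mem_idx (lst : List Int) (j : Nat) :
    ((j : Int) ∈ get_index_for_binary_val lst) ↔ (j < lst.length ∧ lst.getD j 0 == 1) := by
  rw [idx_eq]
  simp only [List.mem_map, List.mem_filter, List.mem_range, Nat.cast_inj]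
  constructor
  · rintro ⟨k, ⟨hk, hp⟩, rfl⟩
    exact ⟨hk, hp⟩
  · rintro ⟨hj, hp⟩; exact ⟨j, ⟨hj, hp⟩, rfl⟩

lemma contains_idx (lst : List Int) (j : Nat) :
    (get_index_for_binary_val lst).contains ((j : Nat) : Int)
      = (decide (j < lst.length) && (lst.getD j 0 == 1)) := by
  rw [Bool.eq_iff_iff]
  simp [mem_idx]

-- the counting loop of A is the length
lemma count_loop (l : List Int) :
    l.foldl (fun (c : Int) _ => c + 1) 0 = (l.length : Int) := by
  induction l using List.reverseRecOn with
  | nil => rfl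
  | append_singleton xs x ih => simp [ih]

-- disjoint-or split of countP
lemma countP_or_split {α : Type} (l : List α) (p q : α → Bool)
    (h : ∀ x, ¬(p x = true ∧ q x = true)) :
    l.countP (fun x => p x || q x) = l.countP p + l.countP q := by
  induction l with
  | nil => rfl
  | cons y ys ih =>
    by_cases hp : p y = true <;> by_cases hq : q y = true
    · exact absurd ⟨hp, hq⟩ (h y)
    all_goals (simp [hp, hq, ih]; try omega)

-- countP over a larger range equals countP over a smaller one if the predicate dies beyond it
lemma countP_range_shrink (p : Nat → Bool) (m n : Nat) (hmn : m ≤ n)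
    (h : ∀ k, m ≤ k → p k = false) :
    (List.range n).countP p = (List.range m).countP p := by
  obtain ⟨d, rfl⟩ := Nat.exists_eq_add_of_le hmn
  rw [List.range_add, List.countP_append]
  have hz : ((List.range d).map (fun k => m + k)).countP p = 0 := by
    rw [List.countP_eq_zero]
    intro x hx
    simp only [List.mem_map] at hx
    obtain ⟨k, _, rfl⟩ := hx
    simp [h (m + k) (Nat.le_add_right m k)]
  omega

lemma bne_eq_or (x y : Bool) : (x != y) = ((x && !y) || (y && !x)) := by
  cases x <;> cases y <;> rfl

-- one side of the symmetric difference, as a countP over the range of its own list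
lemma diff_side_len (u v : List Int) :
    ((get_index_for_binary_val u).filter
        (fun x => !(get_index_for_binary_val v).contains x)).length
      = (List.range u.length).countP
          (fun k => (decide (k < u.length) && (u.getD k 0 == 1))
                    && !(decide (k < v.length) && (v.getD k 0 == 1))) := by
  conv_lhs => rw [idx_eq u]
  rw [List.filter_map, List.length_map, ← List.countP_eq_length_filter, List.countP_filter]
  refine List.countP_congr ?_
  intro k hk
  simp only [List.mem_range] at hk
  simp only [Function.comp_def, contains_idx, hk, decide_true, Bool.true_and]
  cases (u.getD k 0 == 1) <;> cases (decide (k < v.length) && (v.getD k 0 == 1)) <;> simp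

-- the core count identity: |symmdiff of index sets| as one positional scan
lemma main_eq (a b : List Int) :
    shepard_distance_function a b = shepard_distance_function_alt a b := by
  unfold shepard_distance_function shepard_distance_function_alt sym_difference
  dsimp only
  rw [PySem.Set.ofList_eq_self_of_nodup _ (nodup_idx a),
      PySem.Set.ofList_eq_self_of_nodup _ (nodup_idx b)]
  rw [count_loop, PySem.List.length_pyRange_one]
  rw [PySem.List.foldl_if_add_one]
  have hsym : (PySem.Set.symmDiff (get_index_for_binary_val a) (get_index_for_binary_val b)).length
      = ((get_index_for_binary_val a).filter
            (fun x => !(get_index_for_binary_val b).contains x)).length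
        + ((get_index_for_binary_val b).filter
            (fun x => !(get_index_for_binary_val a).contains x)).length := by
    show (_ ++ _ : List Int).length = _
    exact List.length_append
  rw [hsym, diff_side_len a b, diff_side_len b a]
  -- now the B side
  have hB : (PySem.List.pyRange 0 (max a.length b.length : Nat) 1).countP
      (fun i =>
        ((decide (i < (a.length : Int)) && (PySem.List.pyGetD a i 0 == 1))
          != (decide (i < (b.length : Int)) && (PySem.List.pyGetD b i 0 == 1))))
      = (List.range (max a.length b.length)).countP
          (fun k => ((decide (k < a.length) && (a.getD k 0 == 1))
                      && !(decide (k < b.length) && (b.getD k 0 == 1)))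
                    || ((decide (k < b.length) && (b.getD k 0 == 1))
                      && !(decide (k < a.length) && (a.getD k 0 == 1)))) := by
    rw [PySem.List.pyRange_zero_nat, List.countP_map]
    refine List.countP_congr ?_
    intro k _
    simp only [Function.comp_def, PySem.List.pyGetD_natCast, Nat.cast_lt, bne_eq_or]
  have hdisj : ∀ k : Nat, ¬((((decide (k < a.length) && (a.getD k 0 == 1))
                      && !(decide (k < b.length) && (b.getD k 0 == 1))) = true)
                  ∧ (((decide (k < b.length) && (b.getD k 0 == 1))
                      && !(decide (k < a.length) && (a.getD k 0 == 1))) = true)) := by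
    intro k hk
    obtain ⟨h1, h2⟩ := hk
    simp only [Bool.and_eq_true, Bool.not_eq_true'] at h1 h2
    rw [h1.1.1, h1.1.2] at h2
    simp at h2
  rw [hB, countP_or_split _ _ _ hdisj]
  rw [countP_range_shrink _ a.length (max a.length b.length) (Nat.le_max_left _ _)
        (by intro k hk; simp [Nat.not_lt.mpr hk]),
      countP_range_shrink _ b.length (max a.length b.length) (Nat.le_max_right _ _)
        (by intro k hk; simp [Nat.not_lt.mpr hk])]
  omega

-- ===== VERDICT =====
theorem shepard_distance_function_spec : Claim_equal_shepard_distance_function := by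
  intro a b _
  unfold Spec_shepard_distance_function
  exact main_eq a b
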